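-- pv_equiv track=rewrite | github.com/Tratut/SchoolTask | ft_covert_num.py | ft_covert_num
-- ===== SOURCE A (Python) =====
-- def ft_covert_num(x, base):
--     cop = x
--     b = 0
--     i = 0
--
--     while cop > 0:
--         b = (cop % base) * 10 ** i + b
--         cop //= base
--         i += 1
--     return b
-- ===== SOURCE B (Python) =====
-- def ft_covert_num(x, base):
--     digits = []
--     cop = x
--     while cop > 0:
--         digits.append(cop % base)
--         cop //= base
--     b = 0
--     for d in reversed(digits):
--         b = b * 10 + d
--     return b
-- ===== Notes on version B (the rewrite author's own statement) =====
-- stated objective: alternative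
-- what changed: B first collects all base digits into a list in one pass, then reconstructs the packed decimal by Horner's method over the reversed digit list, instead of A's single interleaved pass that recomputes 10**i each iteration.
import Mathlib
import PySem

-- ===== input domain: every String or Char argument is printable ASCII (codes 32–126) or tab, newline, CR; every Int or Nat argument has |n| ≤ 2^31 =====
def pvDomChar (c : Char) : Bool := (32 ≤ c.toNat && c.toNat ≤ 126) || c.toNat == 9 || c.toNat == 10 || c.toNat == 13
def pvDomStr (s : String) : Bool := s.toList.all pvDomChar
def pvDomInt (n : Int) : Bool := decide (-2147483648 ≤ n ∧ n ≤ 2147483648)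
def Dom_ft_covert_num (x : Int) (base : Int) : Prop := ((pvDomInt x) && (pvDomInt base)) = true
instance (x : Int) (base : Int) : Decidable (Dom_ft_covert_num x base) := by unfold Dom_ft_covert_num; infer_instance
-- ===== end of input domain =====

-- B collects the base digits into a list first and then folds them with Horner's rule,
-- replacing A's interleaved single loop that recomputes 10**i each step (alternative decomposition, same cost class).


-- termination fact for both loops: under the totality guard the quotient's toNat shrinks
theorem pvLoopDec (cop base : Int) (h1 : 0 < cop) (h2 : 2 ≤ base ∨ base < 0) :
    (PySem.Int.floordiv cop base).toNat < cop.toNat := by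
  rcases h2 with hb | hb
  · have h3 : PySem.Int.floordiv cop base < cop :=
      (PySem.Int.floordiv_lt_iff_lt_mul (by omega)).mpr (by nlinarith)
    have h0 : (0:Int) ≤ PySem.Int.floordiv cop base :=
      (PySem.Int.le_floordiv_iff_mul_le (by omega)).mpr (by nlinarith)
    omega
  · have h4 := PySem.Int.floordiv_mul_add_mod cop base
    have h5 := PySem.Int.mod_neg_bounds cop hb
    have h6 : PySem.Int.floordiv cop base ≤ 0 := by nlinarith [h5.2]
    omega

-- ===== PORT A =====
-- while cop > 0: b = (cop % base) * 10 ** i + b; cop //= base; i += 1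
-- (the guard's second conjunct only makes the loop total in Lean; Python raises on base = 0 and
--  diverges on base = 1 with cop > 0 — both outside Pre_)
def ftLoopA (base cop b : Int) (i : Nat) : Int :=
  if h : 0 < cop ∧ (2 ≤ base ∨ base < 0) then
    ftLoopA base (PySem.Int.floordiv cop base) (PySem.Int.mod cop base * 10 ^ i + b) (i + 1)
  else b
termination_by cop.toNat
decreasing_by exact pvLoopDec _ _ h.1 h.2

def ft_covert_num (x : Int) (base : Int) : Int := ftLoopA base x 0 0

-- ===== PORT B =====
-- pass 1: digits = []; while cop > 0: digits.append(cop % base); cop //= base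
def ftDigits (base cop : Int) : List Int :=
  if h : 0 < cop ∧ (2 ≤ base ∨ base < 0) then
    PySem.Int.mod cop base :: ftDigits base (PySem.Int.floordiv cop base)
  else []
termination_by cop.toNat
decreasing_by exact pvLoopDec _ _ h.1 h.2

-- pass 2: b = 0; for d in reversed(digits): b = b * 10 + d
def ft_covert_num_alt (x : Int) (base : Int) : Int :=
  (ftDigits base x).reverse.foldl (fun b d => b * 10 + d) 0

-- ===== PRECONDITION & SPEC =====
-- Pre_ excludes exactly the inputs where Python A does not return: x > 0 with base = 0
-- (ZeroDivisionError) and x > 0 with base = 1 (infinite loop); B behaves the same there.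
def Pre_ft_covert_num (x : Int) (base : Int) : Prop := x ≤ 0 ∨ 2 ≤ base ∨ base < 0
instance (x : Int) (base : Int) : Decidable (Pre_ft_covert_num x base) := by
  unfold Pre_ft_covert_num; infer_instance
def pvWitness_ft_covert_num : Int × Int := (10, 2)

def Spec_ft_covert_num (x : Int) (base : Int) (out : Int) : Prop := out = ft_covert_num_alt x base
instance (x : Int) (base : Int) (out : Int) : Decidable (Spec_ft_covert_num x base out) := by
  unfold Spec_ft_covert_num; infer_instance

-- ===== CLAIM (what is proved, stated in full; the proofs are below) =====
def Claim_equal_ft_covert_num : Prop := ∀ (x : Int) (base : Int), Dom_ft_covert_num x base → Pre_ft_covert_num x base → Spec_ft_covert_num x base (ft_covert_num x base)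

-- ===== LEMMAS AND PROOFS =====

-- A's accumulator equals Horner's value of the digit list shifted by 10^i
theorem loop_eq_horner (base cop b : Int) (i : Nat) :
    ftLoopA base cop b i
      = (ftDigits base cop).reverse.foldl (fun b d => b * 10 + d) 0 * 10 ^ i + b := by
  induction cop, b, i using ftLoopA.induct base with
  | case1 cop b i h ih =>
      rw [ftLoopA, dif_pos h, ftDigits, dif_pos h, ih]
      simp [List.foldl_append]
      ring
  | case2 cop b i h =>
      rw [ftLoopA, dif_neg h, ftDigits, dif_neg h]
      simp

-- ===== VERDICT (by name: the statement is the Claim_ definition above) =====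
theorem ft_covert_num_spec : Claim_equal_ft_covert_num := by
  intro x base _ _
  unfold Spec_ft_covert_num ft_covert_num ft_covert_num_alt
  rw [loop_eq_horner]
  ring
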